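-- pv_equiv track=rewrite | github.com/klkid969/IS211_Assignment13 | recursion.py | compareTo
-- ===== SOURCE A (Python) =====
-- def compareTo(s1, s2):
--     """Recursive function to compare two strings"""
--     if not s1 and not s2:  # Both strings are empty
--         return 0
--     elif not s1:  # s1 is empty
--         return -1
--     elif not s2:  # s2 is empty
--         return 1
--     elif s1[0] != s2[0]:  # First characters differ
--         return ord(s1[0]) - ord(s2[0])
--     else:  # First characters match, compare the rest
--         return compareTo(s1[1:], s2[1:])
-- ===== SOURCE B (Python) =====
-- def compareTo(s1, s2):
--     """Iterative single-pass comparison over indices, no slicing."""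
--     n1, n2 = len(s1), len(s2)
--     i = 0
--     while i < n1 and i < n2:
--         if s1[i] != s2[i]:
--             return ord(s1[i]) - ord(s2[i])
--         i += 1
--     if i < n2:
--         return -1
--     if i < n1:
--         return 1
--     return 0
-- ===== Notes on version B (the rewrite author's own statement) =====
-- stated objective: faster
-- what changed: Replaces the recursion with s[1:] slicing (each step copies both remaining strings) by an iterative single-pass index loop with no slicing and no recursion.
import Mathlib
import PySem

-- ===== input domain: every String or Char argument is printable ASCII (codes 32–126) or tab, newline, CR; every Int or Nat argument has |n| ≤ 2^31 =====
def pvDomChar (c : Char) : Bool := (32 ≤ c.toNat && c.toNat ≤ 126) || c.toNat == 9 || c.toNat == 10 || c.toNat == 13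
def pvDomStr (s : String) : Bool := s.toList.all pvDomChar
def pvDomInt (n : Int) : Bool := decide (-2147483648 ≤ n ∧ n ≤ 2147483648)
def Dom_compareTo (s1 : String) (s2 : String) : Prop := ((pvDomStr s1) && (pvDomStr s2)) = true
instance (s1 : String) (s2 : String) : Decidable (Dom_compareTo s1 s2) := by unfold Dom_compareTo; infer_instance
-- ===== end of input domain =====

-- B replaces A's O(n^2) slice-and-recurse with an O(n) iterative index loop (no slicing); return value only.

-- ===== PORT A =====
-- A's recursion on the two strings, slicing off the first char each step.
def compareToAux : List Char → List Char → Int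
  | [], [] => 0
  | [], _ :: _ => -1
  | _ :: _, [] => 1
  | a :: as, b :: bs => if a ≠ b then (a.toNat : Int) - (b.toNat : Int) else compareToAux as bs

def compareTo (s1 : String) (s2 : String) : Int := compareToAux s1.toList s2.toList

-- ===== PORT B =====
-- B's while loop over index i; getD is safe since i is guarded to be in range.
def compareToLoop (l1 l2 : List Char) (i : Nat) : Int :=
  if i < l1.length ∧ i < l2.length then
    if l1.getD i ' ' ≠ l2.getD i ' ' then
      ((l1.getD i ' ').toNat : Int) - ((l2.getD i ' ').toNat : Int)
    else compareToLoop l1 l2 (i + 1)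
  else if i < l2.length then -1
  else if i < l1.length then 1
  else 0
termination_by l1.length - i

def compareTo_alt (s1 : String) (s2 : String) : Int := compareToLoop s1.toList s2.toList 0

-- ===== PRECONDITION & SPEC =====
def Spec_compareTo (s1 : String) (s2 : String) (out : Int) : Prop := out = compareTo_alt s1 s2
instance (s1 : String) (s2 : String) (out : Int) : Decidable (Spec_compareTo s1 s2 out) := by unfold Spec_compareTo; infer_instance

-- ===== CLAIM (what is proved, stated in full; the proofs are below) =====
def Claim_equal_compareTo : Prop := ∀ (s1 : String) (s2 : String), Dom_compareTo s1 s2 → Spec_compareTo s1 s2 (compareTo s1 s2)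

-- ===== LEMMAS AND PROOFS =====

-- The loop at index i+1 on (a::l1, b::l2) is the loop at index i on (l1, l2).
theorem compareToLoop_shift (l1 l2 : List Char) (a b : Char) (i : Nat) :
    compareToLoop (a :: l1) (b :: l2) (i + 1) = compareToLoop l1 l2 i := by
  fun_induction compareToLoop l1 l2 i with
  | case1 i h h2 =>
    rw [compareToLoop.eq_def]; simp_all
  | case2 i h h2 ih =>
    rw [compareToLoop.eq_def]; simp_all
  | case3 i h h2 =>
    rw [compareToLoop.eq_def]; simp_all <;> omega
  | case4 i h h2 h3 =>
    rw [compareToLoop.eq_def]; simp_all <;> omega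
  | case5 i h h2 h3 =>
    rw [compareToLoop.eq_def]; simp_all <;> omega

theorem compareToAux_eq_loop (l1 l2 : List Char) :
    compareToAux l1 l2 = compareToLoop l1 l2 0 := by
  induction l1 generalizing l2 with
  | nil =>
    cases l2 <;> · rw [compareToAux, compareToLoop]; simp
  | cons a as ih =>
    cases l2 with
    | nil => rw [compareToAux, compareToLoop]; simp
    | cons b bs =>
      rw [compareToAux, compareToLoop]
      by_cases hab : a = b
      · simp [hab, compareToLoop_shift, ih]
      · simp [hab]

-- ===== VERDICT (by name: the statement is the Claim_ definition above) =====
theorem compareTo_spec : Claim_equal_compareTo := by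
  intro s1 s2 _
  unfold Spec_compareTo compareTo compareTo_alt
  exact compareToAux_eq_loop _ _
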